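-- pv_equiv track=rewrite | github.com/eabalestra/specvalid | experiments/collect_results.py | create_name_mapping
-- ===== SOURCE A (Python) =====
-- def create_name_mapping(subjects_map, existing_subjects):
--     """
--     Create a mapping between different naming conventions.
--     Maps actual directory names to subject info.
--     """
--     name_mapping = {}
--
--     # Direct mapping for exact matches
--     for subject in existing_subjects:
--         if subject in subjects_map:
--             name_mapping[subject] = (subject, subjects_map[subject])
--
--     # Handle naming variations - try exact class_method match first
--     for existing_subject in existing_subjects:
--         if existing_subject not in name_mapping:
--             # Convert existing subject to lowercase for comparison
--             existing_lower = existing_subject.lower()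
--
--             # Try to find exact match by converting subject names to expected format
--             for mapped_subject, (class_name, method_name) in subjects_map.items():
--                 # Create expected directory name from class and method
--                 class_simple = class_name.split(".")[-1]  # Get last part of class name
--                 expected_dir = f"{class_simple}_{method_name}"
--
--                 # Try multiple variations of expected directory name
--                 variations = [
--                     expected_dir,
--                     expected_dir.lower(),
--                     f"{class_simple.lower()}_{method_name}",
--                     mapped_subject,
--                     mapped_subject.lower(),
--                 ]
--
--                 if (
--                     existing_subject in variations
--                     or existing_lower in [v.lower() for v in variations]
--                     or existing_subject.lower() == expected_dir.lower()
--                 ):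
--                     mapping_info = (mapped_subject, (class_name, method_name))
--                     name_mapping[existing_subject] = mapping_info
--                     break
--
--     # Fallback: if still no mapping, use the directory name as-is
--     for existing_subject in existing_subjects:
--         if existing_subject not in name_mapping:
--             # Create a fallback mapping using the directory name
--             name_mapping[existing_subject] = (existing_subject, ("", ""))
--
--     return name_mapping
-- ===== SOURCE B (Python) =====
-- def create_name_mapping(subjects_map, existing_subjects):
--     """
--     Create a mapping between different naming conventions.
--     Maps actual directory names to subject info.
--
--     B: one preprocessing pass builds a lowercase lookup table (first
--     producing subject wins via setdefault), then a single classifying pass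
--     over existing_subjects replaces A's three passes and nested scan.
--     """
--     # Precompute: lowercase variation key -> (mapped_subject, (class, method)).
--     # A's membership test over the 5 variations reduces to
--     # lower(existing) == lower(expected_dir) or lower(existing) == lower(mapped_subject).
--     table = {}
--     for mapped_subject, (class_name, method_name) in subjects_map.items():
--         class_simple = class_name.split(".")[-1]
--         info = (mapped_subject, (class_name, method_name))
--         table.setdefault((class_simple + "_" + method_name).lower(), info)
--         table.setdefault(mapped_subject.lower(), info)
--
--     exact, varied, fallback = [], [], []
--     seen = set()
--     for subject in existing_subjects:
--         if subject in seen: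
--             continue
--         seen.add(subject)
--         if subject in subjects_map:
--             exact.append((subject, (subject, subjects_map[subject])))
--         else:
--             info = table.get(subject.lower())
--             if info is not None:
--                 varied.append((subject, info))
--             else:
--                 fallback.append((subject, (subject, ("", ""))))
--
--     # keys are distinct (seen-dedup), so this dict is just the concatenation
--     return dict(exact + varied + fallback)
-- ===== Notes on version B (the rewrite author's own statement) =====
-- stated objective: faster
-- what changed: A's three passes with a nested per-subject scan over subjects_map are replaced by one preprocessing pass that builds a lowercase variation-key lookup table (setdefault = first producing entry wins) plus a single classifying pass over existing_subjects into exact/variation/fallback buckets.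
import Mathlib
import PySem

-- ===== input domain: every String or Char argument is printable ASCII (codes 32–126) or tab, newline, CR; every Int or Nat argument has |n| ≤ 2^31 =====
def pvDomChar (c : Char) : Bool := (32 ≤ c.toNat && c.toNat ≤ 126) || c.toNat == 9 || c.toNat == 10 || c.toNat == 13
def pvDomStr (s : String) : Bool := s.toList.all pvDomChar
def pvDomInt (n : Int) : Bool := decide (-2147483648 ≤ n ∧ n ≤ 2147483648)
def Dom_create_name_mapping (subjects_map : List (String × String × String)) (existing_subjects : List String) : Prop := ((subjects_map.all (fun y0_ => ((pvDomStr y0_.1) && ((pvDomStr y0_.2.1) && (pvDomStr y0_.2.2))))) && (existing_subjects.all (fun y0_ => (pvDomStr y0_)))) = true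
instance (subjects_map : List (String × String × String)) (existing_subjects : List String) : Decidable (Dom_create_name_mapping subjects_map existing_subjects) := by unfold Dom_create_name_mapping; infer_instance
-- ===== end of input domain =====

-- B replaces A's three passes and nested per-subject scan by a precomputed
-- lowercase-key lookup table plus a single classifying pass (objective: faster).

-- ===== PORT A =====

-- class_name.split(".")[-1]  (split never returns an empty list, so [-1] never raises)
def pvClassSimple (c : String) : List Char :=
  PySem.List.pyGetD (PySem.Chars.splitOn c.toList ['.']) (-1) []

-- the inner-loop condition of A's second pass, over one subjects_map entry x = (mapped, (class, method));
-- st = existing_subject, sl = existing_lower (strings compared as their code-point lists — exact)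
def pvCondA (st sl : List Char) (x : String × String × String) : Bool :=
  let cs := pvClassSimple x.2.1
  let e := cs ++ '_' :: x.2.2.toList
  let variations := [e, PySem.Chars.lower e, PySem.Chars.lower cs ++ '_' :: x.2.2.toList,
                     x.1.toList, PySem.Chars.lower x.1.toList]
  variations.contains st || (variations.map PySem.Chars.lower).contains sl ||
    (sl == PySem.Chars.lower e)

-- the inner 'for … in subjects_map.items(): … break' loop: first matching entry
def pvFindA (items : List (String × String × String)) (st sl : List Char) :
    Option (String × String × String) :=
  match items with
  | [] => none
  | x :: rest => if pvCondA st sl x then some x else pvFindA rest st sl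

-- pass-1 loop body
def pvStep1 (d : PySem.Dict String (String × String))
    (nm : PySem.Dict String (String × String × String)) (s : String) :
    PySem.Dict String (String × String × String) :=
  if d.contains s then nm.insert s (s, d.getD s ("", "")) else nm

-- guarded-insert loop body shared by A's passes 2 and 3 ('if s not in name_mapping: …')
def pvStepG (F : String → Option (String × String × String))
    (nm : PySem.Dict String (String × String × String)) (s : String) :
    PySem.Dict String (String × String × String) :=
  if nm.contains s then nm else
    match F s with
    | some x => nm.insert s x
    | none => nm

def create_name_mapping (subjects_map : List (String × String × String)) (existing_subjects : List String) : List (String × String × (String × String)) :=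
  let d := PySem.Dict.ofList subjects_map
  let nm1 := existing_subjects.foldl (pvStep1 d) PySem.Dict.empty
  let nm2 := existing_subjects.foldl
    (pvStepG (fun s => pvFindA d.items s.toList (PySem.Chars.lower s.toList))) nm1
  let nm3 := existing_subjects.foldl (pvStepG (fun s => some (s, ("", "")))) nm2
  nm3.items

-- ===== PORT B =====

-- the two lowercase table keys produced by one subjects_map entry
def pvKeyE (x : String × String × String) : List Char :=
  PySem.Chars.lower (pvClassSimple x.2.1 ++ '_' :: x.2.2.toList)

def pvKeyM (x : String × String × String) : List Char :=
  PySem.Chars.lower x.1.toList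

-- preprocessing pass: variation key -> first producing entry (setdefault = first wins)
def pvTable (items : List (String × String × String)) :
    PySem.Dict (List Char) (String × String × String) :=
  items.foldl (fun t x => (t.setdefault (pvKeyE x) x).setdefault (pvKeyM x) x) PySem.Dict.empty

-- single classifying pass body: seen-set dedup, then exact / table / fallback buckets
def pvStepB (d : PySem.Dict String (String × String))
    (table : PySem.Dict (List Char) (String × String × String))
    (st : PySem.Set String × List (String × String × String × String) ×
          List (String × String × String × String) × List (String × String × String × String))
    (s : String) :
    PySem.Set String × List (String × String × String × String) ×
      List (String × String × String × String) × List (String × String × String × String) :=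
  if PySem.Set.contains st.1 s then st
  else
    let seen := PySem.Set.add st.1 s
    if d.contains s then (seen, st.2.1 ++ [(s, (s, d.getD s ("", "")))], st.2.2.1, st.2.2.2)
    else
      match table.get? (PySem.Chars.lower s.toList) with
      | some x => (seen, st.2.1, st.2.2.1 ++ [(s, x)], st.2.2.2)
      | none => (seen, st.2.1, st.2.2.1, st.2.2.2 ++ [(s, (s, ("", "")))])

def create_name_mapping_alt (subjects_map : List (String × String × String)) (existing_subjects : List String) : List (String × String × (String × String)) :=
  let d := PySem.Dict.ofList subjects_map
  let table := pvTable d.items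
  let r := existing_subjects.foldl (pvStepB d table) (PySem.Set.empty, ([], [], []))
  -- dict(exact + varied + fallback): the keys are distinct (seen-set dedup), so the dict is the concatenation
  r.2.1 ++ r.2.2.1 ++ r.2.2.2

-- ===== PRECONDITION & SPEC =====
def Spec_create_name_mapping (subjects_map : List (String × String × String)) (existing_subjects : List String) (out : List (String × String × (String × String))) : Prop := out = create_name_mapping_alt subjects_map existing_subjects
instance (subjects_map : List (String × String × String)) (existing_subjects : List String) (out : List (String × String × (String × String))) : Decidable (Spec_create_name_mapping subjects_map existing_subjects out) := by unfold Spec_create_name_mapping; infer_instance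

-- ===== CLAIM (what is proved, stated in full; the proofs are below) =====
def Claim_equal_create_name_mapping : Prop := ∀ (subjects_map : List (String × String × String)) (existing_subjects : List String), Dom_create_name_mapping subjects_map existing_subjects → Spec_create_name_mapping subjects_map existing_subjects (create_name_mapping subjects_map existing_subjects)

-- ===== LEMMAS AND PROOFS =====

-- ---- lowercase facts ----

theorem pv_isupper_iff (d : Char) :
    PySem.Chars.isupper d = true ↔ 65 ≤ d.toNat ∧ d.toNat ≤ 90 := by
  have hA : 'A'.toNat = 65 := rfl
  have hZ : 'Z'.toNat = 90 := rfl
  simp only [PySem.Chars.isupper, Bool.and_eq_true, decide_eq_true_eq, Char.le_def,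
    UInt32.le_iff_toNat_le, Char.toNat_val, hA, hZ]

theorem pv_lowerChar_idem (c : Char) :
    PySem.Chars.lowerChar (PySem.Chars.lowerChar c) = PySem.Chars.lowerChar c := by
  unfold PySem.Chars.lowerChar
  by_cases h : PySem.Chars.isupper c = true
  · rw [if_pos h]
    have hc := (pv_isupper_iff c).mp h
    have hval : Nat.isValidChar (c.toNat + 32) := Or.inl (by omega)
    have ht : (Char.ofNat (c.toNat + 32)).toNat = c.toNat + 32 := by
      rw [Char.toNat_ofNat, if_pos hval]
    have hfalse : ¬ PySem.Chars.isupper (Char.ofNat (c.toNat + 32)) = true := by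
      intro hcontra
      have := (pv_isupper_iff _).mp hcontra
      omega
    rw [if_neg hfalse]
  · rw [if_neg h, if_neg h]

theorem pv_lower_idem (l : List Char) :
    PySem.Chars.lower (PySem.Chars.lower l) = PySem.Chars.lower l := by
  simp only [PySem.Chars.lower, List.map_map]
  apply List.map_congr_left
  intro a _
  exact pv_lowerChar_idem a

theorem pv_lower_append (a b : List Char) :
    PySem.Chars.lower (a ++ b) = PySem.Chars.lower a ++ PySem.Chars.lower b := by
  simp [PySem.Chars.lower]

-- A's five-variation membership test collapses to: lower(existing) is one of the entry's two lowercase keys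
theorem pv_condA_eq (st : List Char) (x : String × String × String) :
    pvCondA st (PySem.Chars.lower st) x =
      (PySem.Chars.lower st == pvKeyE x || PySem.Chars.lower st == pvKeyM x) := by
  unfold pvCondA pvKeyE pvKeyM
  dsimp only
  have hl3 : PySem.Chars.lower (PySem.Chars.lower (pvClassSimple x.2.1) ++ '_' :: x.2.2.toList)
      = PySem.Chars.lower (pvClassSimple x.2.1 ++ '_' :: x.2.2.toList) := by
    rw [pv_lower_append, pv_lower_append, pv_lower_idem]
  rw [Bool.eq_iff_iff]
  simp only [List.contains_iff_mem, List.mem_map, List.mem_cons, List.not_mem_nil, or_false,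
    Bool.or_eq_true, beq_iff_eq]
  constructor
  · rintro ((h | ⟨a, ha, hla⟩) | h)
    · rcases h with h | h | h | h | h
      · exact Or.inl (by rw [h])
      · exact Or.inl (by rw [h, pv_lower_idem])
      · exact Or.inl (by rw [h]; exact hl3)
      · exact Or.inr (by rw [h])
      · exact Or.inr (by rw [h, pv_lower_idem])
    · rcases ha with ha | ha | ha | ha | ha
      · exact Or.inl (by rw [← hla, ha])
      · exact Or.inl (by rw [← hla, ha, pv_lower_idem])
      · exact Or.inl (by rw [← hla, ha]; exact hl3)
      · exact Or.inr (by rw [← hla, ha])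
      · exact Or.inr (by rw [← hla, ha, pv_lower_idem])
    · exact Or.inl h
  · rintro (h | h)
    · exact Or.inr h
    · exact Or.inl (Or.inr ⟨x.1.toList, Or.inr (Or.inr (Or.inr (Or.inl rfl))), h.symm⟩)

-- first entry whose key set contains q (reference form of both the inner scan and the table lookup)
def pvFindT (items : List (String × String × String)) (q : List Char) :
    Option (String × String × String) :=
  match items with
  | [] => none
  | x :: rest => if q == pvKeyE x || q == pvKeyM x then some x else pvFindT rest q

theorem pv_findA_eq_findT (items : List (String × String × String)) (st : List Char) :
    pvFindA items st (PySem.Chars.lower st) = pvFindT items (PySem.Chars.lower st) := by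
  induction items with
  | nil => rfl
  | cons x rest ih =>
    simp only [pvFindA, pvFindT, pv_condA_eq, ih]

theorem pv_table_get_aux (items : List (String × String × String)) (q : List Char)
    (t : PySem.Dict (List Char) (String × String × String)) :
    (items.foldl (fun t x => (t.setdefault (pvKeyE x) x).setdefault (pvKeyM x) x) t).get? q =
      ((t.get? q).or (pvFindT items q)) := by
  induction items generalizing t with
  | nil => simp [pvFindT]
  | cons x rest ih =>
    rw [List.foldl_cons, ih]
    have hstep : ((t.setdefault (pvKeyE x) x).setdefault (pvKeyM x) x).get? q
        = (t.get? q).or (if q == pvKeyE x || q == pvKeyM x then some x else none) := by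
      by_cases hm : q = pvKeyM x
      · rw [hm, PySem.Dict.get?_setdefault_self]
        by_cases he : pvKeyM x = pvKeyE x
        · rw [← he, PySem.Dict.get?_setdefault_self]
          cases h : t.get? (pvKeyM x) <;> simp [h]
        · rw [PySem.Dict.get?_setdefault_of_ne _ _ he]
          cases h : t.get? (pvKeyM x) <;> simp [h]
      · rw [PySem.Dict.get?_setdefault_of_ne _ _ hm]
        by_cases he : q = pvKeyE x
        · rw [he, PySem.Dict.get?_setdefault_self]
          cases h : t.get? (pvKeyE x) <;> simp [h]
        · rw [PySem.Dict.get?_setdefault_of_ne _ _ he]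
          have hbE : (q == pvKeyE x) = false := by simp [he]
          have hbM : (q == pvKeyM x) = false := by simp [hm]
          simp [hbE, hbM]
    rw [hstep, Option.or_assoc]
    congr 1
    have hfx : pvFindT (x :: rest) q
        = if (q == pvKeyE x || q == pvKeyM x) = true then some x else pvFindT rest q := rfl
    rw [hfx]
    by_cases hcond : (q == pvKeyE x || q == pvKeyM x) = true
    · rw [if_pos hcond, if_pos hcond]
      rfl
    · rw [if_neg hcond, if_neg hcond, Option.none_or]

theorem pv_table_get (items : List (String × String × String)) (q : List Char) :
    (pvTable items).get? q = pvFindT items q := by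
  unfold pvTable
  rw [pv_table_get_aux]
  rw [PySem.Dict.get?_empty, Option.none_or]

-- ---- the filter/discard bookkeeping of first-occurrence dedup ----

theorem pv_filter_cons_discard_neg {α : Type} [BEq α] [LawfulBEq α]
    (p : α → Bool) (s : α) (X : List α) (hp : p s = false) :
    List.filter p (s :: PySem.Set.discard X s) = List.filter p X := by
  rw [List.filter_cons]
  rw [if_neg (by simp [hp])]
  unfold PySem.Set.discard
  rw [List.filter_filter]
  apply List.filter_congr
  intro a _
  by_cases h : a = s
  · subst h; simp [hp]
  · simp [h]

theorem pv_filter_cons_discard_pos {α : Type} [BEq α] [LawfulBEq α]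
    (p : α → Bool) (s : α) (X : List α) (hp : p s = true) :
    List.filter p (s :: PySem.Set.discard X s) = s :: List.filter (fun a => p a && !(a == s)) X := by
  rw [List.filter_cons]
  rw [if_pos (by simp [hp])]
  unfold PySem.Set.discard
  rw [List.filter_filter]

theorem pv_map_fst {β : Type} (f : String → β) (L : List String) :
    List.map (fun p => p.1) (L.map (fun s => (s, f s))) = L := by
  induction L with
  | nil => rfl
  | cons a L ih => simp only [List.map_cons, ih]

-- ---- pass characterizations ----

-- pass 1: the direct-match loop appends, in first-occurrence order, one item per new matching subject
theorem pv_pass1_items (d : PySem.Dict String (String × String)) (es : List String)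
    (nm : PySem.Dict String (String × String × String))
    (hnd : nm.keys.Nodup)
    (hval : ∀ k v, nm.get? k = some v → v = (k, d.getD k ("", ""))) :
    (es.foldl (pvStep1 d) nm).items =
      nm.items ++
        ((PySem.Set.ofList es).filter (fun s => d.contains s && !nm.contains s)).map
          (fun s => (s, (s, d.getD s ("", "")))) := by
  induction es generalizing nm with
  | nil => simp [PySem.Set.ofList]
  | cons s es ih =>
    rw [List.foldl_cons, PySem.Set.ofList_cons]
    by_cases hd : d.contains s = true
    · by_cases hc : nm.contains s = true
      · have hstep : pvStep1 d nm s = nm := by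
          unfold pvStep1
          rw [if_pos hd]
          apply PySem.Dict.ext
          rw [PySem.Dict.items_insert_of_contains _ _ hc]
          have hmap : ∀ p ∈ nm.items,
              (if (p.1 == s) = true then (s, (s, d.getD s ("", ""))) else p) = p := by
            intro p hp
            by_cases hps : p.1 = s
            · have hget : nm.get? s = some p.2 := by
                rw [PySem.Dict.get?_eq_some_iff_mem_items _ _ _ hnd]
                rw [← hps]
                exact hp
              have hv := hval s p.2 hget
              simp only [hps, beq_self_eq_true, if_true]
              rw [← hps] at hv ⊢
              rw [← hv]
            · simp [hps]
          rw [List.map_congr_left hmap]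
          simp
        rw [hstep, ih nm hnd hval,
          pv_filter_cons_discard_neg _ _ _ (by simp only [hd, hc, Bool.not_true, Bool.and_false])]
      · have hcf : nm.contains s = false := by rw [Bool.eq_false_iff]; exact hc
        have hstep : pvStep1 d nm s = nm.insert s (s, d.getD s ("", "")) := by
          unfold pvStep1; rw [if_pos hd]
        have hnd' : (nm.insert s (s, d.getD s ("", ""))).keys.Nodup :=
          PySem.Dict.nodup_keys_insert _ _ _ hnd
        have hval' : ∀ k v, (nm.insert s (s, d.getD s ("", ""))).get? k = some v →
            v = (k, d.getD k ("", "")) := by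
          intro k v hget
          rw [PySem.Dict.get?_insert] at hget
          by_cases hk : k = s
          · rw [if_pos hk] at hget
            cases hget
            rw [hk]
          · rw [if_neg hk] at hget
            exact hval k v hget
        rw [hstep, ih _ hnd' hval',
          PySem.Dict.items_insert_of_not_contains _ _ hcf,
          pv_filter_cons_discard_pos _ _ _ (by simp only [hd, hcf, Bool.not_false, Bool.and_true])]
        have e : List.filter
              (fun t => d.contains t && !(nm.insert s (s, d.getD s ("", ""))).contains t)
              (PySem.Set.ofList es)
            = List.filter (fun a => (d.contains a && !nm.contains a) && !(a == s))
              (PySem.Set.ofList es) := by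
          apply List.filter_congr
          intro t _
          rw [PySem.Dict.contains_insert]
          by_cases hts : t = s
          · subst hts; simp
          · have hbs : (t == s) = false := by simp [hts]
            simp [hbs]
        simp [e]
    · have hdf : d.contains s = false := by rw [Bool.eq_false_iff]; exact hd
      have hstep : pvStep1 d nm s = nm := by
        unfold pvStep1; rw [if_neg hd]
      rw [hstep, ih nm hnd hval,
        pv_filter_cons_discard_neg _ _ _ (by simp only [hdf, Bool.false_and])]

-- passes 2/3: a guarded-insert loop appends one item per new subject F accepts
theorem pv_passG_items (F : String → Option (String × String × String)) (es : List String)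
    (nm : PySem.Dict String (String × String × String)) (hnd : nm.keys.Nodup) :
    (es.foldl (pvStepG F) nm).items =
      nm.items ++
        ((PySem.Set.ofList es).filter (fun s => !nm.contains s && (F s).isSome)).map
          (fun s => (s, (F s).getD (s, ("", "")))) := by
  induction es generalizing nm with
  | nil => simp [PySem.Set.ofList]
  | cons s es ih =>
    rw [List.foldl_cons, PySem.Set.ofList_cons]
    by_cases hc : nm.contains s = true
    · have hstep : pvStepG F nm s = nm := by
        unfold pvStepG; rw [if_pos hc]
      rw [hstep, ih nm hnd,
        pv_filter_cons_discard_neg _ _ _ (by simp only [hc, Bool.not_true, Bool.false_and])]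
    · have hcf : nm.contains s = false := by rw [Bool.eq_false_iff]; exact hc
      cases hF : F s with
      | none =>
        have hstep : pvStepG F nm s = nm := by
          unfold pvStepG; rw [if_neg hc, hF]
        rw [hstep, ih nm hnd,
          pv_filter_cons_discard_neg _ _ _ (by simp only [hcf, hF, Bool.not_false, Bool.true_and, Option.isSome_none, Option.isSome_some])]
      | some x =>
        have hstep : pvStepG F nm s = nm.insert s x := by
          unfold pvStepG; rw [if_neg hc, hF]
        have hnd' : (nm.insert s x).keys.Nodup :=
          PySem.Dict.nodup_keys_insert _ _ _ hnd
        rw [hstep, ih _ hnd',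
          PySem.Dict.items_insert_of_not_contains _ _ hcf,
          pv_filter_cons_discard_pos _ _ _ (by simp only [hcf, hF, Bool.not_false, Bool.true_and, Option.isSome_none, Option.isSome_some])]
        have e : List.filter (fun t => !(nm.insert s x).contains t && (F t).isSome)
              (PySem.Set.ofList es)
            = List.filter (fun a => (!nm.contains a && (F a).isSome) && !(a == s))
              (PySem.Set.ofList es) := by
          apply List.filter_congr
          intro t _
          rw [PySem.Dict.contains_insert]
          by_cases hts : t = s
          · subst hts; simp
          · have hbs : (t == s) = false := by simp [hts]
            simp [hbs]
        simp [e, hF]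

-- Python's a == b on keys agrees with propositional equality
theorem pv_beq_eq_decide {α : Type} [BEq α] [LawfulBEq α] [DecidableEq α] (a b : α) :
    (a == b) = decide (a = b) := by
  cases hb : a == b
  · have hne : a ≠ b := fun hab => by simp [hab] at hb
    simp [hne]
  · have heq : a = b := eq_of_beq hb
    simp [heq]

-- B's single pass: the three buckets collect, in first-occurrence order, the new subjects of each class
theorem pv_passB (d : PySem.Dict String (String × String))
    (table : PySem.Dict (List Char) (String × String × String)) (es : List String)
    (seen : PySem.Set String)
    (ex va fb : List (String × String × String × String)) :
    es.foldl (pvStepB d table) (seen, (ex, va, fb)) =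
      (PySem.Set.update seen es,
       (ex ++ ((PySem.Set.ofList es).filter
            (fun s => !PySem.Set.contains seen s && d.contains s)).map
            (fun s => (s, (s, d.getD s ("", "")))),
        va ++ ((PySem.Set.ofList es).filter
            (fun s => !PySem.Set.contains seen s && !d.contains s &&
              (table.get? (PySem.Chars.lower s.toList)).isSome)).map
            (fun s => (s, (table.get? (PySem.Chars.lower s.toList)).getD (s, ("", "")))),
        fb ++ ((PySem.Set.ofList es).filter
            (fun s => !PySem.Set.contains seen s && !d.contains s &&
              !(table.get? (PySem.Chars.lower s.toList)).isSome)).map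
            (fun s => (s, (s, ("", "")))))) := by
  induction es generalizing seen ex va fb with
  | nil => simp [PySem.Set.ofList, PySem.Set.update_nil]
  | cons s es ih =>
    rw [List.foldl_cons, PySem.Set.update_cons, PySem.Set.ofList_cons]
    by_cases hs : PySem.Set.contains seen s = true
    · have hstep : pvStepB d table (seen, (ex, va, fb)) s = (seen, (ex, va, fb)) := by
        unfold pvStepB; dsimp only; rw [if_pos hs]
      have hadd : seen.add s = seen := PySem.Set.add_of_mem ((PySem.Set.contains_iff _ _).mp hs)
      rw [hstep, ih, hadd,
        pv_filter_cons_discard_neg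
          (fun t => !PySem.Set.contains seen t && d.contains t) _ _ (by simp only [hs, Bool.not_true, Bool.false_and]),
        pv_filter_cons_discard_neg
          (fun t => !PySem.Set.contains seen t && !d.contains t &&
            (table.get? (PySem.Chars.lower t.toList)).isSome) _ _ (by simp only [hs, Bool.not_true, Bool.false_and]),
        pv_filter_cons_discard_neg
          (fun t => !PySem.Set.contains seen t && !d.contains t &&
            !(table.get? (PySem.Chars.lower t.toList)).isSome) _ _ (by simp only [hs, Bool.not_true, Bool.false_and])]
    · have hsf : PySem.Set.contains seen s = false := by rw [Bool.eq_false_iff]; exact hs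
      have hmem : s ∉ seen := fun hmem => hs ((PySem.Set.contains_iff _ _).mpr hmem)
      have hadd : seen.add s = seen ++ [s] := PySem.Set.add_of_not_mem hmem
      have hcadd : ∀ t : String, PySem.Set.contains (seen.add s) t
          = (PySem.Set.contains seen t || t == s) := by
        intro t
        rw [hadd]
        simp [PySem.Set.contains, List.contains_append, pv_beq_eq_decide]
      by_cases hd : d.contains s = true
      · have hstep : pvStepB d table (seen, (ex, va, fb)) s
            = (seen.add s, (ex ++ [(s, (s, d.getD s ("", "")))], va, fb)) := by
          unfold pvStepB; dsimp only; rw [if_neg hs, if_pos hd]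
        rw [hstep, ih,
          pv_filter_cons_discard_pos
            (fun t => !PySem.Set.contains seen t && d.contains t) _ _ (by simp only [hsf, hd, Bool.not_false, Bool.not_true, Bool.true_and, Bool.false_and]),
          pv_filter_cons_discard_neg
            (fun t => !PySem.Set.contains seen t && !d.contains t &&
              (table.get? (PySem.Chars.lower t.toList)).isSome) _ _ (by simp only [hsf, hd, Bool.not_false, Bool.not_true, Bool.true_and, Bool.false_and]),
          pv_filter_cons_discard_neg
            (fun t => !PySem.Set.contains seen t && !d.contains t &&
              !(table.get? (PySem.Chars.lower t.toList)).isSome) _ _ (by simp only [hsf, hd, Bool.not_false, Bool.not_true, Bool.true_and, Bool.false_and])]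
        have e1 : List.filter (fun t => !PySem.Set.contains (seen.add s) t && d.contains t)
              (PySem.Set.ofList es)
            = List.filter (fun a => (!PySem.Set.contains seen a && d.contains a) && !(a == s))
              (PySem.Set.ofList es) := by
          apply List.filter_congr
          intro t _
          rw [hcadd t]
          by_cases hts : t = s
          · subst hts; simp
          · have hbs : (t == s) = false := by simp [hts]
            simp [hbs]
        have e2 : List.filter (fun t => !PySem.Set.contains (seen.add s) t && !d.contains t &&
              (table.get? (PySem.Chars.lower t.toList)).isSome) (PySem.Set.ofList es)
            = List.filter (fun t => !PySem.Set.contains seen t && !d.contains t &&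
              (table.get? (PySem.Chars.lower t.toList)).isSome) (PySem.Set.ofList es) := by
          apply List.filter_congr
          intro t _
          rw [hcadd t]
          by_cases hts : t = s
          · subst hts; simp [hd]
          · have hbs : (t == s) = false := by simp [hts]
            simp [hbs]
        have e3 : List.filter (fun t => !PySem.Set.contains (seen.add s) t && !d.contains t &&
              !(table.get? (PySem.Chars.lower t.toList)).isSome) (PySem.Set.ofList es)
            = List.filter (fun t => !PySem.Set.contains seen t && !d.contains t &&
              !(table.get? (PySem.Chars.lower t.toList)).isSome) (PySem.Set.ofList es) := by
          apply List.filter_congr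
          intro t _
          rw [hcadd t]
          by_cases hts : t = s
          · subst hts; simp [hd]
          · have hbs : (t == s) = false := by simp [hts]
            simp [hbs]
        rw [e1, e2, e3, List.append_assoc]
        simp only [List.map_cons, List.singleton_append]
      · have hdf : d.contains s = false := by rw [Bool.eq_false_iff]; exact hd
        cases hT : table.get? (PySem.Chars.lower s.toList) with
        | some x =>
          have hstep : pvStepB d table (seen, (ex, va, fb)) s
              = (seen.add s, (ex, va ++ [(s, x)], fb)) := by
            unfold pvStepB; dsimp only
            rw [if_neg hs, if_neg hd, hT]
          rw [hstep, ih,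
            pv_filter_cons_discard_neg
              (fun t => !PySem.Set.contains seen t && d.contains t) _ _ (by simp only [hsf, hdf, Bool.not_false, Bool.true_and]),
            pv_filter_cons_discard_pos
              (fun t => !PySem.Set.contains seen t && !d.contains t &&
                (table.get? (PySem.Chars.lower t.toList)).isSome) _ _ (by simp only [hsf, hdf, hT, Bool.not_false, Bool.not_true, Bool.true_and, Bool.and_false, Bool.and_true, Option.isSome_some, Option.isSome_none]),
            pv_filter_cons_discard_neg
              (fun t => !PySem.Set.contains seen t && !d.contains t &&
                !(table.get? (PySem.Chars.lower t.toList)).isSome) _ _ (by simp only [hsf, hdf, hT, Bool.not_false, Bool.not_true, Bool.true_and, Bool.and_false, Bool.and_true, Option.isSome_some, Option.isSome_none])]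
          have e1 : List.filter (fun t => !PySem.Set.contains (seen.add s) t && d.contains t)
                (PySem.Set.ofList es)
              = List.filter (fun t => !PySem.Set.contains seen t && d.contains t)
                (PySem.Set.ofList es) := by
            apply List.filter_congr
            intro t _
            rw [hcadd t]
            by_cases hts : t = s
            · subst hts; simp [hdf]
            · have hbs : (t == s) = false := by simp [hts]
              simp [hbs]
          have e2 : List.filter (fun t => !PySem.Set.contains (seen.add s) t && !d.contains t &&
                (table.get? (PySem.Chars.lower t.toList)).isSome) (PySem.Set.ofList es)
              = List.filter (fun a => (!PySem.Set.contains seen a && !d.contains a &&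
                (table.get? (PySem.Chars.lower a.toList)).isSome) && !(a == s))
                (PySem.Set.ofList es) := by
            apply List.filter_congr
            intro t _
            rw [hcadd t]
            by_cases hts : t = s
            · subst hts; simp
            · have hbs : (t == s) = false := by simp [hts]
              simp [hbs]
          have e3 : List.filter (fun t => !PySem.Set.contains (seen.add s) t && !d.contains t &&
                !(table.get? (PySem.Chars.lower t.toList)).isSome) (PySem.Set.ofList es)
              = List.filter (fun t => !PySem.Set.contains seen t && !d.contains t &&
                !(table.get? (PySem.Chars.lower t.toList)).isSome) (PySem.Set.ofList es) := by
            apply List.filter_congr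
            intro t _
            rw [hcadd t]
            by_cases hts : t = s
            · subst hts; simp [hT]
            · have hbs : (t == s) = false := by simp [hts]
              simp [hbs]
          rw [e1, e2, e3, List.append_assoc]
          simp only [List.map_cons, List.singleton_append, hT, Option.getD_some]
        | none =>
          have hstep : pvStepB d table (seen, (ex, va, fb)) s
              = (seen.add s, (ex, va, fb ++ [(s, (s, ("", "")))])) := by
            unfold pvStepB; dsimp only
            rw [if_neg hs, if_neg hd, hT]
          rw [hstep, ih,
            pv_filter_cons_discard_neg
              (fun t => !PySem.Set.contains seen t && d.contains t) _ _ (by simp only [hsf, hdf, Bool.not_false, Bool.true_and]),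
            pv_filter_cons_discard_neg
              (fun t => !PySem.Set.contains seen t && !d.contains t &&
                (table.get? (PySem.Chars.lower t.toList)).isSome) _ _ (by simp only [hsf, hdf, hT, Bool.not_false, Bool.not_true, Bool.true_and, Bool.and_false, Bool.and_true, Option.isSome_some, Option.isSome_none]),
            pv_filter_cons_discard_pos
              (fun t => !PySem.Set.contains seen t && !d.contains t &&
                !(table.get? (PySem.Chars.lower t.toList)).isSome) _ _ (by simp only [hsf, hdf, hT, Bool.not_false, Bool.not_true, Bool.true_and, Bool.and_false, Bool.and_true, Option.isSome_some, Option.isSome_none])]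
          have e1 : List.filter (fun t => !PySem.Set.contains (seen.add s) t && d.contains t)
                (PySem.Set.ofList es)
              = List.filter (fun t => !PySem.Set.contains seen t && d.contains t)
                (PySem.Set.ofList es) := by
            apply List.filter_congr
            intro t _
            rw [hcadd t]
            by_cases hts : t = s
            · subst hts; simp [hdf]
            · have hbs : (t == s) = false := by simp [hts]
              simp [hbs]
          have e2 : List.filter (fun t => !PySem.Set.contains (seen.add s) t && !d.contains t &&
                (table.get? (PySem.Chars.lower t.toList)).isSome) (PySem.Set.ofList es)
              = List.filter (fun t => !PySem.Set.contains seen t && !d.contains t &&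
                (table.get? (PySem.Chars.lower t.toList)).isSome) (PySem.Set.ofList es) := by
            apply List.filter_congr
            intro t _
            rw [hcadd t]
            by_cases hts : t = s
            · subst hts; simp [hT]
            · have hbs : (t == s) = false := by simp [hts]
              simp [hbs]
          have e3 : List.filter (fun t => !PySem.Set.contains (seen.add s) t && !d.contains t &&
                !(table.get? (PySem.Chars.lower t.toList)).isSome) (PySem.Set.ofList es)
              = List.filter (fun a => (!PySem.Set.contains seen a && !d.contains a &&
                !(table.get? (PySem.Chars.lower a.toList)).isSome) && !(a == s))
                (PySem.Set.ofList es) := by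
            apply List.filter_congr
            intro t _
            rw [hcadd t]
            by_cases hts : t = s
            · subst hts; simp
            · have hbs : (t == s) = false := by simp [hts]
              simp [hbs]
          rw [e1, e2, e3, List.append_assoc]
          simp only [List.map_cons, List.singleton_append]

-- ===== VERDICT (by name: the statement is the Claim_ definition above) =====
set_option maxHeartbeats 1000000 in
theorem create_name_mapping_spec : Claim_equal_create_name_mapping := by
  intro sm es _
  unfold Spec_create_name_mapping
  simp only [create_name_mapping, create_name_mapping_alt]
  set d := PySem.Dict.ofList sm with hdd
  -- A side, pass 1
  set nm1 := es.foldl (pvStep1 d) PySem.Dict.empty with hnm1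
  have h1 : nm1.items
      = (List.filter (fun s => d.contains s) (PySem.Set.ofList es)).map
          (fun s => (s, (s, d.getD s ("", "")))) := by
    rw [hnm1, pv_pass1_items d es _ PySem.Dict.nodup_keys_empty
      (by intro k v h; rw [PySem.Dict.get?_empty] at h; cases h)]
    simp [PySem.Dict.contains_empty, PySem.Dict.empty]
  have hk1 : nm1.keys = List.filter (fun s => d.contains s) (PySem.Set.ofList es) := by
    simp only [PySem.Dict.keys, h1]
    exact pv_map_fst _ _
  have hndk1 : nm1.keys.Nodup := by
    rw [hk1]
    exact (PySem.Set.nodup_ofList es).filter _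
  have hc1 : ∀ t ∈ PySem.Set.ofList es, nm1.contains t = d.contains t := by
    intro t ht
    rw [PySem.Dict.contains_eq_decide_mem_keys, hk1]
    cases hdt : d.contains t <;> simp [List.mem_filter, ht, hdt]
  -- A side, pass 2
  set nm2 := es.foldl
    (pvStepG (fun s => pvFindA d.items s.toList (PySem.Chars.lower s.toList))) nm1 with hnm2
  have h2 : nm2.items
      = nm1.items ++
        (List.filter (fun s => !d.contains s &&
            (pvFindA d.items s.toList (PySem.Chars.lower s.toList)).isSome)
          (PySem.Set.ofList es)).map
          (fun s => (s, (pvFindA d.items s.toList (PySem.Chars.lower s.toList)).getD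
            (s, ("", "")))) := by
    rw [hnm2, pv_passG_items _ es nm1 hndk1]
    congr 1
    apply congrArg
    apply List.filter_congr
    intro t ht
    rw [hc1 t ht]
  have hk2 : nm2.keys
      = List.filter (fun s => d.contains s) (PySem.Set.ofList es)
        ++ List.filter (fun s => !d.contains s &&
            (pvFindA d.items s.toList (PySem.Chars.lower s.toList)).isSome)
          (PySem.Set.ofList es) := by
    simp only [PySem.Dict.keys, h2, h1, List.map_append]
    rw [pv_map_fst, pv_map_fst]
  have hndk2 : nm2.keys.Nodup := by
    rw [hk2]
    apply List.Nodup.append ((PySem.Set.nodup_ofList es).filter _)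
      ((PySem.Set.nodup_ofList es).filter _)
    intro a ha hb
    rw [List.mem_filter] at ha hb
    have ha2 := ha.2
    have hb2 := hb.2
    rw [ha2] at hb2
    simp at hb2
  have hc2 : ∀ t ∈ PySem.Set.ofList es, nm2.contains t
      = (d.contains t || (pvFindA d.items t.toList (PySem.Chars.lower t.toList)).isSome) := by
    intro t ht
    rw [PySem.Dict.contains_eq_decide_mem_keys, hk2]
    cases hdt : d.contains t <;>
      cases hft : (pvFindA d.items t.toList (PySem.Chars.lower t.toList)).isSome <;>
        simp [List.mem_append, List.mem_filter, ht, hdt, hft]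
  -- A side, pass 3
  have h3 : (es.foldl (pvStepG (fun s => some (s, ("", "")))) nm2).items
      = nm2.items ++
        (List.filter (fun s => !d.contains s &&
            !(pvFindA d.items s.toList (PySem.Chars.lower s.toList)).isSome)
          (PySem.Set.ofList es)).map (fun s => (s, (s, ("", "")))) := by
    rw [pv_passG_items _ es nm2 hndk2]
    simp only [Option.isSome_some, Bool.and_true, Option.getD_some]
    congr 1
    apply congrArg
    apply List.filter_congr
    intro t ht
    rw [hc2 t ht, Bool.not_or]
  rw [h3, h2, h1]
  -- B side
  rw [pv_passB]
  dsimp only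
  simp only [pv_table_get]
  simp only [← pv_findA_eq_findT]
  have eB1 : List.filter
        (fun s => !PySem.Set.contains PySem.Set.empty s && d.contains s) (PySem.Set.ofList es)
      = List.filter (fun s => d.contains s) (PySem.Set.ofList es) :=
    List.filter_congr (fun t _ => rfl)
  have eB2 : List.filter
        (fun s => !PySem.Set.contains PySem.Set.empty s && !d.contains s &&
          (pvFindA d.items s.toList (PySem.Chars.lower s.toList)).isSome) (PySem.Set.ofList es)
      = List.filter (fun s => !d.contains s &&
          (pvFindA d.items s.toList (PySem.Chars.lower s.toList)).isSome)
        (PySem.Set.ofList es) :=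
    List.filter_congr (fun t _ => rfl)
  have eB3 : List.filter
        (fun s => !PySem.Set.contains PySem.Set.empty s && !d.contains s &&
          !(pvFindA d.items s.toList (PySem.Chars.lower s.toList)).isSome) (PySem.Set.ofList es)
      = List.filter (fun s => !d.contains s &&
          !(pvFindA d.items s.toList (PySem.Chars.lower s.toList)).isSome)
        (PySem.Set.ofList es) :=
    List.filter_congr (fun t _ => rfl)
  simp only [eB1, eB2, eB3, List.nil_append, List.append_assoc]
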